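-- pv_equiv track=rewrite | github.com/sergiogblanco1-lab/eterna-backend | video_engine.py | _safe_frases
-- ===== SOURCE A (Python) =====
-- from typing import List, Optional
--
-- def _safe_frases(frases: List[str]) -> List[str]:
--     out = []
--     for frase in frases[:3]:
--         frase = str(frase or "").strip()
--         if not frase:
--             frase = " "
--         out.append(frase)
--     while len(out) < 3:
--         out.append(" ")
--     return out
-- ===== SOURCE B (Python) =====
-- def _fill(xs, k):
--     # recursively emit exactly k slots, consuming xs; missing slots become " "
--     if k == 0:
--         return []
--     if xs:
--         s = str(xs[0] or "").strip()
--         return [s if s else " "] + _fill(xs[1:], k - 1)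
--     return [" "] + _fill(xs, k - 1)
--
-- def _safe_frases(frases):
--     return _fill(list(frases), 3)
-- ===== Notes on version B (the rewrite author's own statement) =====
-- stated objective: alternative
-- what changed: Replaces the iterative slice-loop plus separate while-padding phase with a single structural recursion on a slot counter that consumes the list and emits a space whenever it is exhausted.
import Mathlib
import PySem

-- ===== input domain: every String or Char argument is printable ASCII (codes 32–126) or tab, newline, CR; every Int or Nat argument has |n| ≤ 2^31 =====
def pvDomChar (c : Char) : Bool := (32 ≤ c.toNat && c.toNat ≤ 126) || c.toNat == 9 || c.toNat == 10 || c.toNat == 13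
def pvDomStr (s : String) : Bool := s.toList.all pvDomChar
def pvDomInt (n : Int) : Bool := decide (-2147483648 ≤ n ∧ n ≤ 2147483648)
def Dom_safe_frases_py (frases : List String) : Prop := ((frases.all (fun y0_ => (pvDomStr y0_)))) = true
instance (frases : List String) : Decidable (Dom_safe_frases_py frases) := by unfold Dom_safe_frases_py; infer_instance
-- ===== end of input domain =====

-- B replaces A's normalize-append loop over frases[:3] plus a separate while-padding
-- phase by one structural recursion on a slot counter that pads as it goes.

-- ===== PORT A =====
-- frase = str(frase or "").strip(); if not frase: frase = " "
def pvNormA (frase : String) : String :=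
  let f := PySem.Str.strip (if frase ≠ "" then frase else "")
  if f = "" then " " else f

-- while len(out) < 3: out.append(" ")
def pvPadA (out : List String) : List String :=
  if out.length < 3 then pvPadA (out ++ [" "]) else out
termination_by 3 - out.length
decreasing_by simp; omega

def safe_frases_py (frases : List String) : List String :=
  pvPadA ((PySem.List.slice frases none (some 3)).foldl (fun out frase => out ++ [pvNormA frase]) [])

-- ===== PORT B =====
-- def _fill(xs, k): emit k slots, consuming xs; missing slots become " "
def pvFill : List String → Nat → List String
  | _, 0 => []
  | [], k + 1 => " " :: pvFill [] k
  | x :: xs, k + 1 =>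
      (let s := PySem.Str.strip (if x ≠ "" then x else "")
       if s ≠ "" then s else " ") :: pvFill xs k

def safe_frases_py_alt (frases : List String) : List String :=
  pvFill frases 3

-- ===== PRECONDITION & SPEC =====
def Spec_safe_frases_py (frases : List String) (out : List String) : Prop := out = safe_frases_py_alt frases
instance (frases : List String) (out : List String) : Decidable (Spec_safe_frases_py frases out) := by unfold Spec_safe_frases_py; infer_instance

-- ===== CLAIM (what is proved, stated in full; the proofs are below) =====
def Claim_equal_safe_frases_py : Prop := ∀ (frases : List String), Dom_safe_frases_py frases → Spec_safe_frases_py frases (safe_frases_py frases)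

-- ===== LEMMAS AND PROOFS =====
theorem pvNorm_fill (s : String) :
    pvNormA s = (let t := PySem.Str.strip (if s ≠ "" then s else ""); if t ≠ "" then t else " ") := by
  unfold pvNormA
  by_cases h : PySem.Str.strip (if s ≠ "" then s else "") = "" <;> simp_all

-- ===== VERDICT (by name: the statement is the Claim_ definition above) =====
theorem safe_frases_py_spec : Claim_equal_safe_frases_py := by
  intro frases _
  unfold Spec_safe_frases_py safe_frases_py safe_frases_py_alt
  match frases with
  | [] =>
      simp [PySem.List.slice, PySem.List.clampIdx, pvPadA, pvFill]
  | [a] =>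
      simp [PySem.List.slice, PySem.List.clampIdx, pvPadA, pvFill, pvNorm_fill]
  | [a, b] =>
      simp [PySem.List.slice, PySem.List.clampIdx, pvPadA, pvFill, pvNorm_fill]
  | a :: b :: c :: rest =>
      simp [PySem.List.slice, PySem.List.clampIdx, pvPadA, pvFill, pvNorm_fill]
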